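-- pv_equiv track=rewrite | github.com/MightyPixel/algorithms | Interviews/Company_2/problem_03.py | solution
-- ===== SOURCE A (Python) =====
-- def get_unsorted_groups(xs):
--     unsorted_groups = []
--
--     j = 0
--     for i in range(len(xs) - 1):
--         if xs[i] < xs[i+1]:
--             unsorted_groups.append(xs[j:i+1])
--             j = i + 1
--
--     unsorted_groups.append(xs[j:])
--
--     return unsorted_groups
--
-- def get_group_min(groups):
--     group_minimals = {}
--
--     def find_group_min(i):
--         if i in group_minimals:
--             min_i_group = group_minimals[i]
--         else:
--             min_i_group = min(groups[i])
--             group_minimals[i] = min_i_group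
--
--         return min_i_group
--
--     return find_group_min
--
-- def solution(xs):
--     unsorted_groups = get_unsorted_groups(xs)
--     result = len(unsorted_groups)
--
--     min_groups = {}
--
--     get_min = get_group_min(unsorted_groups)
--
--     for i, group in enumerate(unsorted_groups):
--         min_i_group = get_min(i)
--
--         for j in range(i - 1, -1, -1):
--             min_j_group = get_min(j)
--
--             if min_i_group < min_j_group:
--                 result -= 1
--
--     return result
-- ===== SOURCE B (Python) =====
-- def solution(xs):
--     # One pass: each group (maximal non-increasing run) has its minimum at its
--     # last element, i.e. xs[i] at each ascent i (xs[i] < xs[i+1]) plus xs[-1].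
--     mins = [xs[i] for i in range(len(xs) - 1) if xs[i] < xs[i + 1]] + [xs[-1]]
--
--     def sort_count(a):
--         # merge sort returning (sorted list, number of inversions)
--         if len(a) <= 1:
--             return a, 0
--         mid = len(a) // 2
--         left, nl = sort_count(a[:mid])
--         right, nr = sort_count(a[mid:])
--         merged = []
--         inv = nl + nr
--         i = j = 0
--         while i < len(left) and j < len(right):
--             if right[j] < left[i]:
--                 merged.append(right[j])
--                 j += 1
--                 inv += len(left) - i
--             else:
--                 merged.append(left[i])
--                 i += 1
--         merged += left[i:]
--         merged += right[j:]
--         return merged, inv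
--
--     _, inv = sort_count(mins)
--     return len(mins) - inv
-- ===== Notes on version B (the rewrite author's own statement) =====
-- stated objective: faster
-- what changed: B skips building group slices and the memoizing closure entirely: each group is a non-increasing run, so its minimum is the element at each ascent plus the last element, collected in one pass; the quadratic double loop over group minima is replaced by merge-sort inversion counting.
import Mathlib
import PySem

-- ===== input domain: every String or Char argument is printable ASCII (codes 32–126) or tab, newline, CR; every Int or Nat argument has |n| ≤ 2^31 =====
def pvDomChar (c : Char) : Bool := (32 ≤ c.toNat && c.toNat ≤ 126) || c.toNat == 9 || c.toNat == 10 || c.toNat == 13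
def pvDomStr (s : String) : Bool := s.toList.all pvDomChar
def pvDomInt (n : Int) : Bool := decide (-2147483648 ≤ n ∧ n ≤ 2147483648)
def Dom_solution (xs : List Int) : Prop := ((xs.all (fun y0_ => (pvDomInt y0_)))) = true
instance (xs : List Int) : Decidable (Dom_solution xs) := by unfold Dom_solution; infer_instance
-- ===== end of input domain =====

-- B computes each group's minimum directly (groups are non-increasing runs, so the min is the
-- element at each ascent plus the last element) and counts inversions of the minima by merge
-- sort instead of A's quadratic memoized double loop; equivalence is proved for nonempty xs.


-- ===== PORT A =====
-- get_unsorted_groups: fold over range(len(xs)-1) with state (groups so far, j);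
-- indices i, i+1 are always in range, so pyGetD _ _ 0 is exact here.
def getUnsortedGroups (xs : List Int) : List (List Int) :=
  let st := (PySem.List.pyRange 0 ((xs.length : Int) - 1) 1).foldl
    (fun (st : List (List Int) × Int) i =>
      if PySem.List.pyGetD xs i 0 < PySem.List.pyGetD xs (i + 1) 0 then
        (st.1 ++ [PySem.List.slice xs (some st.2) (some (i + 1))], i + 1)
      else st) ([], 0)
  st.1 ++ [PySem.List.slice xs (some st.2) none]

-- the memoizing closure find_group_min: cache dict + min(groups[i]).
-- min([]) = ValueError is `none`; the .getD 0 default is never reached under Pre_ (groups nonempty).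
def getMinA (groups : List (List Int)) (cache : PySem.Dict Int Int) (i : Int) :
    Int × PySem.Dict Int Int :=
  match cache.get? i with
  | some v => (v, cache)
  | none =>
      let m := (PySem.List.min? (PySem.List.pyGetD groups i []) (fun y => y)).getD 0
      (m, cache.insert i m)

def solution (xs : List Int) : Int :=
  let groups := getUnsortedGroups xs
  let result : Int := groups.length
  let st := (PySem.List.enumerate groups 0).foldl
    (fun (st : PySem.Dict Int Int × Int) p =>
      let r1 := getMinA groups st.1 p.1
      (PySem.List.pyRange (p.1 - 1) (-1) (-1)).foldl
        (fun (st2 : PySem.Dict Int Int × Int) j =>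
          let r2 := getMinA groups st2.1 j
          if r1.1 < r2.1 then (r2.2, st2.2 - 1) else (r2.2, st2.2))
        (r1.2, st.2))
    (PySem.Dict.empty, result)
  st.2

-- ===== PORT B =====
-- mins = [xs[i] for i in range(len(xs)-1) if xs[i] < xs[i+1]] + [xs[-1]]
-- (indices i, i+1 in range, so pyGetD is exact; xs[-1] = none = IndexError only for xs = [], excluded by Pre_)
def minsB (xs : List Int) : List Int :=
  ((PySem.List.pyRange 0 ((xs.length : Int) - 1) 1).filter
      (fun i => PySem.List.pyGetD xs i 0 < PySem.List.pyGetD xs (i + 1) 0)).map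
    (fun i => PySem.List.pyGetD xs i 0)
  ++ [(PySem.List.pyGet? xs (-1)).getD 0]

-- the merge loop of sort_count: consumes the two sorted halves head by head,
-- adding the remaining-left length when a right element goes first
def sortCountMerge (l r : List Int) : List Int × Int :=
  match l, r with
  | [], r => (r, 0)
  | a :: l', [] => (a :: l', 0)
  | a :: l', b :: r' =>
    if b < a then
      let t := sortCountMerge (a :: l') r'
      (b :: t.1, t.2 + ((l'.length : Int) + 1))
    else
      let t := sortCountMerge l' (b :: r')
      (a :: t.1, t.2)
termination_by l.length + r.length

-- sort_count: merge sort returning (sorted list, inversion count)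
def sortCount (a : List Int) : List Int × Int :=
  if _h : a.length ≤ 1 then (a, 0)
  else
    let mid := a.length / 2
    let tl := sortCount (a.take mid)
    let tr := sortCount (a.drop mid)
    let m := sortCountMerge tl.1 tr.1
    (m.1, tl.2 + tr.2 + m.2)
termination_by a.length
decreasing_by
  · simp only [List.length_take]; omega
  · simp only [List.length_drop]; omega

def solution_alt (xs : List Int) : Int :=
  let mins := minsB xs
  (mins.length : Int) - (sortCount mins).2

-- ===== PRECONDITION & SPEC =====
-- Pre_ excludes only the empty list, on which A raises ValueError (min of an empty group).
def Pre_solution (xs : List Int) : Prop := xs ≠ []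
instance (xs : List Int) : Decidable (Pre_solution xs) := by unfold Pre_solution; infer_instance
def pvWitness_solution : List Int := [2, 1, 3]

def Spec_solution (xs : List Int) (out : Int) : Prop := out = solution_alt xs
instance (xs : List Int) (out : Int) : Decidable (Spec_solution xs out) := by unfold Spec_solution; infer_instance

-- ===== CLAIM (what is proved, stated in full; the proofs are below) =====
def Claim_equal_solution : Prop := ∀ (xs : List Int), Dom_solution xs → Pre_solution xs → Spec_solution xs (solution xs)

-- ===== LEMMAS AND PROOFS =====

-- pairwise inversion count (pairs j < i with m_i < m_j), read off from the left
def pinv : List Int → Int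
  | [] => 0
  | a :: t => ((t.countP (fun b => decide (b < a)) : Nat) : Int) + pinv t

-- cross inversions between a left block and a right block
def cross (l r : List Int) : Int :=
  (r.map (fun b => ((l.countP (fun a => decide (b < a)) : Nat) : Int))).sum

theorem cross_nil_right (l : List Int) : cross l [] = 0 := rfl

theorem cross_nil_left (r : List Int) : cross [] r = 0 := by
  induction r with
  | nil => rfl
  | cons b r ih => simp [cross]

theorem cross_cons_right (l : List Int) (b : Int) (r : List Int) :
    cross l (b :: r) = ((l.countP (fun a => decide (b < a)) : Nat) : Int) + cross l r := by
  simp [cross]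

theorem cross_cons_left (a : Int) (l r : List Int) :
    cross (a :: l) r = ((r.countP (fun b => decide (b < a)) : Nat) : Int) + cross l r := by
  induction r with
  | nil => simp [cross]
  | cons b r ih =>
      rw [cross_cons_right, cross_cons_right, ih]
      simp only [List.countP_cons]
      push_cast
      try ring

theorem cross_append_left (p q r : List Int) : cross (p ++ q) r = cross p r + cross q r := by
  induction p with
  | nil => simp [cross_nil_left]
  | cons a p ih => simp only [List.cons_append, cross_cons_left, ih]; ring

theorem cross_perm_left {l l' : List Int} (h : l.Perm l') (r : List Int) :
    cross l r = cross l' r := by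
  unfold cross
  congr 1
  exact List.map_congr_left (fun b _ => by rw [h.countP_eq])

theorem cross_perm_right (l : List Int) {r r' : List Int} (h : r.Perm r') :
    cross l r = cross l r' :=
  List.Perm.sum_eq (h.map _)

theorem pinv_append (l r : List Int) : pinv (l ++ r) = pinv l + pinv r + cross l r := by
  induction l with
  | nil => simp [pinv, cross_nil_left]
  | cons a l ih =>
      simp only [List.cons_append, pinv, ih, List.countP_append, cross_cons_left]
      push_cast; ring

theorem merge_spec : ∀ (l r : List Int), l.Pairwise (· ≤ ·) → r.Pairwise (· ≤ ·) →
    (sortCountMerge l r).1.Perm (l ++ r) ∧ (sortCountMerge l r).1.Pairwise (· ≤ ·) ∧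
      (sortCountMerge l r).2 = cross l r := by
  intro l r
  fun_induction sortCountMerge l r with
  | case1 r => intro _ hr; simpa [sortCountMerge, cross_nil_left] using hr
  | case2 a l' => intro hl _; simpa [sortCountMerge, cross_nil_right] using hl
  | case3 a l' b r' hba t ih =>
      intro hl hr
      obtain ⟨hperm, hsort, hcnt⟩ := ih hl (List.Pairwise.of_cons hr)
      have hble : ∀ x ∈ (a :: l') ++ r', b ≤ x := by
        intro x hx
        rcases List.mem_append.mp hx with hx | hx
        · rcases List.mem_cons.mp hx with rfl | hx
          · exact le_of_lt hba
          · exact le_of_lt (lt_of_lt_of_le hba (List.rel_of_pairwise_cons hl hx))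
        · exact List.rel_of_pairwise_cons hr hx
      refine ⟨(hperm.cons b).trans List.perm_middle.symm, ?_, ?_⟩
      · exact List.Pairwise.cons (fun x hx => hble x (hperm.mem_iff.mp hx)) hsort
      · rw [hcnt, cross_cons_left]
        have hcp : ((a :: l').countP (fun x => decide (b < x))) = l'.length + 1 := by
          have : ∀ x ∈ a :: l', decide (b < x) = true := by
            intro x hx
            simp only [decide_eq_true_eq]
            rcases List.mem_cons.mp hx with rfl | hx
            · exact hba
            · exact lt_of_lt_of_le hba (List.rel_of_pairwise_cons hl hx)
          rw [List.countP_eq_length.mpr this]; simp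
        rw [cross_cons_right, hcp, cross_cons_left]; push_cast; ring
  | case4 a l' b r' hba t ih =>
      intro hl hr
      obtain ⟨hperm, hsort, hcnt⟩ := ih (List.Pairwise.of_cons hl) hr
      have hale : ∀ x ∈ l' ++ b :: r', a ≤ x := by
        intro x hx
        rcases List.mem_append.mp hx with hx | hx
        · exact List.rel_of_pairwise_cons hl hx
        · rcases List.mem_cons.mp hx with rfl | hx
          · exact not_lt.mp hba
          · exact le_trans (not_lt.mp hba) (List.rel_of_pairwise_cons hr hx)
      refine ⟨hperm.cons a, ?_, ?_⟩
      · exact List.Pairwise.cons (fun x hx => hale x (hperm.mem_iff.mp hx)) hsort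
      · rw [hcnt, cross_cons_left]
        have hcp : ((b :: r').countP (fun x => decide (x < a))) = 0 := by
          rw [List.countP_eq_zero]
          intro x hx
          simp only [decide_eq_true_eq, not_lt]
          rcases List.mem_cons.mp hx with rfl | hx
          · exact not_lt.mp hba
          · exact le_trans (not_lt.mp hba) (List.rel_of_pairwise_cons hr hx)
        rw [hcp]; simp

theorem sortCount_spec : ∀ (a : List Int),
    (sortCount a).1.Perm a ∧ (sortCount a).1.Pairwise (· ≤ ·) ∧ (sortCount a).2 = pinv a := by
  intro a
  fun_induction sortCount a with
  | case1 a h =>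
      match a, h with
      | [], _ => exact ⟨List.Perm.refl _, List.Pairwise.nil, rfl⟩
      | [x], _ => refine ⟨List.Perm.refl _, ?_, ?_⟩ <;> simp [pinv]
  | case2 a h mid tl tr m ihl ihr =>
      obtain ⟨hpl, hsl, hcl⟩ := ihl
      obtain ⟨hpr, hsr, hcr⟩ := ihr
      obtain ⟨hpm, hsm, hcm⟩ := merge_spec tl.1 tr.1 hsl hsr
      have hsplit : a.take mid ++ a.drop mid = a := List.take_append_drop mid a
      refine ⟨?_, hsm, ?_⟩
      · have hp : (a.take mid ++ a.drop mid).Perm a := by rw [hsplit]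
        exact hpm.trans ((hpl.append hpr).trans hp)
      · rw [hcm, hcl, hcr, cross_perm_left hpl, cross_perm_right _ hpr]
        conv_rhs => rw [← hsplit]
        rw [pinv_append]

-- ---------- A-side: the minimum value A computes for a group ----------
def mval (g : List Int) : Int := (PySem.List.min? g (fun y => y)).getD 0

def Mg (G : List (List Int)) (i : Int) : Int := mval (PySem.List.pyGetD G i [])

-- the memo cache only ever holds correct group minima
def GoodC (G : List (List Int)) (c : PySem.Dict Int Int) : Prop :=
  ∀ k v, c.get? k = some v → v = Mg G k

theorem goodC_empty (G : List (List Int)) : GoodC G PySem.Dict.empty := by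
  intro k v h
  simp [pysem] at h

theorem getMinA_spec (G : List (List Int)) (c : PySem.Dict Int Int) (i : Int)
    (h : GoodC G c) : (getMinA G c i).1 = Mg G i ∧ GoodC G (getMinA G c i).2 := by
  unfold getMinA
  cases hc : c.get? i with
  | some v => exact ⟨h i v hc, h⟩
  | none =>
      refine ⟨rfl, ?_⟩
      intro k v hk
      by_cases hki : k = i
      · subst hki
        rw [PySem.Dict.get?_insert_self] at hk
        cases hk
        rfl
      · rw [PySem.Dict.get?_insert_of_ne _ _ hki] at hk
        exact h k v hk

-- prefix-driven inversion accumulator matching A's nested loops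
def invAux : List Int → List Int → Int
  | _, [] => 0
  | p, m :: rest => ((p.countP (fun x => decide (m < x)) : Nat) : Int) + invAux (p ++ [m]) rest

theorem invAux_eq (l p : List Int) : invAux p l = cross p l + pinv l := by
  induction l generalizing p with
  | nil => simp [invAux, cross_nil_right, pinv]
  | cons m rest ih =>
      rw [invAux, ih, cross_append_left, cross_cons_left, cross_nil_left,
        cross_cons_right, pinv]
      ring

-- A's inner loop: decrements by the number of earlier groups with a larger minimum
theorem innerA_spec (G : List (List Int)) (mi : Int) :
    ∀ (js : List Int) (c : PySem.Dict Int Int) (res : Int), GoodC G c →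
    (js.foldl (fun st2 j =>
        let r2 := getMinA G st2.1 j
        if mi < r2.1 then (r2.2, st2.2 - 1) else (r2.2, st2.2)) (c, res)).2
      = res - ((js.countP (fun j => decide (mi < Mg G j)) : Nat) : Int)
    ∧ GoodC G (js.foldl (fun st2 j =>
        let r2 := getMinA G st2.1 j
        if mi < r2.1 then (r2.2, st2.2 - 1) else (r2.2, st2.2)) (c, res)).1 := by
  intro js
  induction js with
  | nil => intro c res h; exact ⟨by simp, h⟩
  | cons j js ih =>
      intro c res h
      obtain ⟨h1, h2⟩ := getMinA_spec G c j h
      simp only [List.foldl_cons, h1]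
      by_cases hlt : mi < Mg G j
      · have := ih (getMinA G c j).2 (res - 1) h2
        simp only [if_pos hlt]
        refine ⟨?_, this.2⟩
        rw [this.1, List.countP_cons]
        simp only [hlt, decide_true, if_pos]
        push_cast
        ring
      · have := ih (getMinA G c j).2 res h2
        simp only [if_neg hlt]
        refine ⟨?_, this.2⟩
        rw [this.1, List.countP_cons]
        simp [hlt]

theorem Mg_nat (G : List (List Int)) (s : Nat) (h : s < G.length) :
    Mg G (s : Int) = mval (G[s]'h) := by
  unfold Mg
  rw [PySem.List.pyGetD_natCast, List.getD_eq_getElem _ _ h]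

-- A's outer loop over the remaining groups, given the already-processed prefix
theorem outerA_spec (G : List (List Int)) :
    ∀ (n s : Nat), s + n = G.length →
    ∀ (c : PySem.Dict Int Int) (res : Int), GoodC G c →
    ((PySem.List.enumerate (G.drop s) (s : Int)).foldl
        (fun st p =>
          let r1 := getMinA G st.1 p.1
          (PySem.List.pyRange (p.1 - 1) (-1) (-1)).foldl
            (fun st2 j =>
              let r2 := getMinA G st2.1 j
              if r1.1 < r2.1 then (r2.2, st2.2 - 1) else (r2.2, st2.2))
            (r1.2, st.2))
        (c, res)).2
      = res - invAux ((PySem.List.pyRange 0 (s : Int) 1).map (Mg G)) ((G.drop s).map mval) := by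
  intro n
  induction n with
  | zero =>
      intro s hs c res hc
      rw [List.drop_of_length_le (by omega)]
      simp [invAux]
  | succ n ih =>
      intro s hs c res hc
      have hsl : s < G.length := by omega
      rw [List.drop_eq_getElem_cons hsl, PySem.List.enumerate_cons, List.foldl_cons]
      obtain ⟨h1, h2⟩ := getMinA_spec G c (s : Int) hc
      simp only [h1]
      obtain ⟨hin, hgood⟩ := innerA_spec G (Mg G (s : Int))
        (PySem.List.pyRange ((s : Int) - 1) (-1) (-1)) (getMinA G c (s : Int)).2 res h2
      have hcast : ((s : Int) + 1) = (((s + 1 : Nat)) : Int) := by push_cast; ring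
      rw [hcast]
      rw [ih (s + 1) (by omega) _ _ hgood]
      rw [hin]
      -- rewrite the countdown range as the reverse of the ascending prefix range
      have hrev : PySem.List.pyRange ((s : Int) - 1) (-1) (-1)
          = (PySem.List.pyRange 0 (s : Int) 1).reverse := by
        rw [PySem.List.pyRange_neg_one_eq_reverse]
        norm_num
      rw [hrev, List.countP_reverse] at *
      -- turn the index count into a count over the prefix minima
      have hcnt : (PySem.List.pyRange 0 (s : Int) 1).countP (fun j => decide (Mg G (s : Int) < Mg G j))
          = ((PySem.List.pyRange 0 (s : Int) 1).map (Mg G)).countP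
              (fun x => decide (Mg G (s : Int) < x)) := by
        rw [List.countP_map]
        rfl
      -- unfold one step of invAux on the RHS
      have hpfx : (PySem.List.pyRange 0 (((s + 1 : Nat)) : Int) 1).map (Mg G)
          = (PySem.List.pyRange 0 (s : Int) 1).map (Mg G) ++ [Mg G (s : Int)] := by
        have : ((((s + 1 : Nat)) : Int)) = (s : Int) + 1 := by push_cast; ring
        rw [this, PySem.List.pyRange_one_succ_right (by positivity), List.map_append]
        rfl
      rw [hpfx]
      rw [List.map_cons, invAux, ← Mg_nat G s hsl, hcnt]
      ring


theorem solution_alt_eq (xs : List Int) :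
    solution_alt xs = ((minsB xs).length : Int) - pinv (minsB xs) := by
  show ((minsB xs).length : Int) - (sortCount (minsB xs)).2 = _
  rw [(sortCount_spec (minsB xs)).2.2]


-- ---------- structure of the groups: non-increasing runs, min = last element ----------
theorem last_le_of_nonincr : ∀ (l : List Int),
    (∀ t : Nat, t + 1 < l.length → l.getD (t+1) 0 ≤ l.getD t 0) →
    ∀ x ∈ l, l.getLast?.getD 0 ≤ x := by
  intro l
  induction l with
  | nil => intro _ x hx; simp at hx
  | cons a l ih =>
      intro hmono x hx
      cases l with
      | nil =>
          rcases List.mem_singleton.mp hx with rfl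
          simp
      | cons b t =>
          rw [List.getLast?_cons_cons]
          have hmono' : ∀ t' : Nat, t' + 1 < (b :: t).length →
              (b :: t).getD (t'+1) 0 ≤ (b :: t).getD t' 0 := by
            intro t' h
            have hlen' : t' + 1 + 1 < (a :: b :: t).length := by
              simp at h ⊢
              omega
            have := hmono (t'+1) hlen'
            simpa using this
          rcases List.mem_cons.mp hx with rfl | hx
          · have hb : (b :: t).getLast?.getD 0 ≤ b :=
              ih hmono' b List.mem_cons_self
            have hba : b ≤ x := by
              have := hmono 0 (by simp)
              simpa using this
            exact le_trans hb hba
          · exact ih hmono' x hx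

theorem mval_eq_last (l : List Int) (hne : l ≠ [])
    (hmono : ∀ t : Nat, t + 1 < l.length → l.getD (t+1) 0 ≤ l.getD t 0) :
    mval l = l.getLast?.getD 0 := by
  cases h : PySem.List.min? l (fun y => y) with
  | none => exact absurd ((PySem.List.min?_eq_none_iff _ _).mp h) hne
  | some m =>
      have hlast : l.getLast? = some (l.getLast hne) := List.getLast?_eq_some_getLast hne
      have h1 : m ≤ l.getLast?.getD 0 := by
        rw [hlast]
        exact PySem.List.min?_isMin h _ (List.getLast_mem hne)
      have h2 : l.getLast?.getD 0 ≤ m :=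
        last_le_of_nonincr l hmono m (PySem.List.min?_mem h)
      unfold mval
      rw [h]
      exact le_antisymm h1 h2

theorem sliceMin (xs : List Int) (jn i : Nat) (hji : jn ≤ i) (hin : i < xs.length)
    (hno : ∀ k : Nat, jn ≤ k → k + 1 ≤ i → ¬ (xs.getD k 0 < xs.getD (k+1) 0)) :
    mval ((xs.drop jn).take (i + 1 - jn)) = xs.getD i 0 := by
  set sub := (xs.drop jn).take (i + 1 - jn) with hsub
  have hlen : sub.length = i + 1 - jn := by
    simp [hsub]
    omega
  have hne : sub ≠ [] := by
    intro h
    rw [h] at hlen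
    simp at hlen
    omega
  have hget : ∀ t : Nat, t < i + 1 - jn → sub.getD t 0 = xs.getD (jn + t) 0 := by
    intro t ht
    rw [List.getD_eq_getElem _ _ (by omega), List.getD_eq_getElem _ _ (by omega)]
    simp [hsub]
  have hmono : ∀ t : Nat, t + 1 < sub.length → sub.getD (t+1) 0 ≤ sub.getD t 0 := by
    intro t ht
    rw [hlen] at ht
    rw [hget (t+1) (by omega), hget t (by omega)]
    have hh := hno (jn + t) (by omega) (by omega)
    have he : jn + (t + 1) = (jn + t) + 1 := by omega
    rw [he]
    exact not_lt.mp hh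
  rw [mval_eq_last sub hne hmono]
  have hlast : sub.getLast?.getD 0 = sub.getD (sub.length - 1) 0 := by
    rw [List.getLast?_eq_getElem?, List.getD_eq_getElem?_getD]
  rw [hlast, hlen]
  have hidx : i + 1 - jn - 1 = i - jn := by omega
  rw [hidx, hget (i - jn) (by omega)]
  congr 1
  omega

theorem dropMin (xs : List Int) (jn : Nat) (hji : jn ≤ xs.length - 1) (hne : xs ≠ [])
    (hno : ∀ k : Nat, jn ≤ k → k + 1 ≤ xs.length - 1 → ¬ (xs.getD k 0 < xs.getD (k+1) 0)) :
    mval (xs.drop jn) = xs.getD (xs.length - 1) 0 := by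
  have hpos : 1 ≤ xs.length := List.length_pos_of_ne_nil hne
  have h1 : xs.drop jn = (xs.drop jn).take ((xs.length - 1) + 1 - jn) := by
    rw [show (xs.length - 1) + 1 - jn = (xs.drop jn).length by simp; omega, List.take_length]
  rw [h1]
  exact sliceMin xs jn (xs.length - 1) hji (by omega) hno

theorem last_getD (xs : List Int) :
    (PySem.List.pyGet? xs (-1)).getD 0 = xs.getD (xs.length - 1) 0 := by
  rw [PySem.List.pyGet?_neg_one, List.getLast?_eq_getElem?, List.getD_eq_getElem?_getD]

-- the group-building fold of A, started at index a with pending group start jn,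
-- produces exactly the ascent minima of B plus the final element
theorem groups_fold (xs : List Int) :
    ∀ (b a jn : Nat), (a : Int) + b = (xs.length : Int) - 1 → jn ≤ a →
    (∀ k : Nat, jn ≤ k → k + 1 ≤ a → ¬ (xs.getD k 0 < xs.getD (k+1) 0)) →
    ∀ (gs : List (List Int)),
    (((PySem.List.pyRange (a : Int) ((xs.length : Int) - 1) 1).foldl
        (fun (st : List (List Int) × Int) i =>
          if PySem.List.pyGetD xs i 0 < PySem.List.pyGetD xs (i + 1) 0 then
            (st.1 ++ [PySem.List.slice xs (some st.2) (some (i + 1))], i + 1)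
          else st) (gs, (jn : Int))).1
      ++ [PySem.List.slice xs
            (some ((PySem.List.pyRange (a : Int) ((xs.length : Int) - 1) 1).foldl
              (fun (st : List (List Int) × Int) i =>
                if PySem.List.pyGetD xs i 0 < PySem.List.pyGetD xs (i + 1) 0 then
                  (st.1 ++ [PySem.List.slice xs (some st.2) (some (i + 1))], i + 1)
                else st) (gs, (jn : Int))).2) none]).map mval
      = gs.map mval
        ++ ((PySem.List.pyRange (a : Int) ((xs.length : Int) - 1) 1).filter
              (fun i => PySem.List.pyGetD xs i 0 < PySem.List.pyGetD xs (i + 1) 0)).map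
            (fun i => PySem.List.pyGetD xs i 0)
        ++ [(PySem.List.pyGet? xs (-1)).getD 0] := by
  intro b
  induction b with
  | zero =>
      intro a jn ha hja hno gs
      have hxs : xs ≠ [] := by
        intro h
        subst h
        simp only [List.length_nil] at ha
        push_cast at ha
        omega
      rw [PySem.List.pyRange_one_eq_nil (by omega)]
      have haeq : a = xs.length - 1 := by
        have hpos : 1 ≤ xs.length := List.length_pos_of_ne_nil hxs
        omega
      simp only [List.foldl_nil, List.filter_nil, List.map_nil, List.map_append,
        List.map_cons, List.append_nil]
      rw [PySem.List.slice_from_natCast,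
        dropMin xs jn (by omega) hxs (by intro k h1 h2; exact hno k h1 (by omega)),
        last_getD]
  | succ b ih =>
      intro a jn ha hja hno gs
      have hlt : (a : Int) < (xs.length : Int) - 1 := by omega
      rw [PySem.List.pyRange_one_cons hlt, List.foldl_cons, List.filter_cons]
      have hc1 : ((a : Int) + 1) = (((a + 1 : Nat)) : Int) := by push_cast; ring
      have hgla : PySem.List.pyGetD xs (a : Int) 0 = xs.getD a 0 := PySem.List.pyGetD_natCast ..
      have hgla1 : PySem.List.pyGetD xs ((a : Int) + 1) 0 = xs.getD (a + 1) 0 := by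
        rw [hc1, PySem.List.pyGetD_natCast]
      by_cases hcond : PySem.List.pyGetD xs (a : Int) 0 < PySem.List.pyGetD xs ((a : Int) + 1) 0
      · rw [if_pos hcond]
        simp only [hc1]
        rw [ih (a + 1) (a + 1) (by push_cast; omega) (le_refl _) (by intro k h1 h2; omega)
          (gs ++ [PySem.List.slice xs (some (jn : Int)) (some (((a + 1 : Nat)) : Int))])]
        rw [if_pos (by simpa using hcond)]
        have hslice : PySem.List.slice xs (some (jn : Int)) (some (((a + 1 : Nat)) : Int))
            = (xs.drop jn).take (a + 1 - jn) := PySem.List.slice_natCast ..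
        have hmv : mval (PySem.List.slice xs (some (jn : Int)) (some (((a + 1 : Nat)) : Int)))
            = xs.getD a 0 := by
          rw [hslice]
          exact sliceMin xs jn a hja (by omega) hno
        simp only [List.map_append, List.map_cons, List.map_nil, hmv, hgla,
          List.append_assoc, List.cons_append, List.nil_append]
      · rw [if_neg hcond]
        have hno' : ∀ k : Nat, jn ≤ k → k + 1 ≤ a + 1 → ¬ (xs.getD k 0 < xs.getD (k+1) 0) := by
          intro k h1 h2
          rcases Nat.lt_or_ge (k + 1) (a + 1) with h3 | h3
          · exact hno k h1 (by omega)
          · have hk : k = a := by omega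
            subst hk
            rw [← hgla, ← hgla1]
            exact hcond
        simp only [hc1]
        rw [ih (a + 1) jn (by push_cast; omega) (by omega) hno' gs]
        rw [if_neg (by simpa using hcond)]

theorem map_mval_groups (xs : List Int) (hne : xs ≠ []) :
    (getUnsortedGroups xs).map mval = minsB xs := by
  have hpos : 1 ≤ xs.length := List.length_pos_of_ne_nil hne
  have h := groups_fold xs (xs.length - 1) 0 0 (by push_cast; omega) (le_refl 0)
    (by intro k h1 h2; omega) []
  simpa [getUnsortedGroups, minsB] using h

theorem solution_eq (xs : List Int) :
    solution xs = (((getUnsortedGroups xs).length : Nat) : Int)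
      - invAux [] ((getUnsortedGroups xs).map mval) := by
  have h := outerA_spec (getUnsortedGroups xs) (getUnsortedGroups xs).length 0 (by omega)
      PySem.Dict.empty ((getUnsortedGroups xs).length : Int) (goodC_empty _)
  rw [show (((0 : Nat)) : Int) = 0 by norm_num] at h
  rw [List.drop_zero, PySem.List.pyRange_one_eq_nil (le_refl 0), List.map_nil] at h
  exact h


theorem solution_agrees (xs : List Int) (hne : xs ≠ []) : solution xs = solution_alt xs := by
  have hlen : (minsB xs).length = (getUnsortedGroups xs).length := by
    rw [← map_mval_groups xs hne, List.length_map]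
  rw [solution_eq, solution_alt_eq, invAux_eq, cross_nil_left, map_mval_groups xs hne, hlen]
  ring

-- ===== VERDICT (by name: the statement is the Claim_ definition above) =====
theorem solution_spec : Claim_equal_solution := by
  intro xs _ hpre
  unfold Spec_solution
  exact solution_agrees xs hpre
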